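-- pv_equiv track=rewrite | github.com/mto9902/SheetMusicGenerator | backend/app/generator/_planning.py | _adapt_step_template
-- ===== SOURCE A (Python) =====
-- def _adapt_step_template(template: list[int], target_steps: int) -> list[int]:
--     if target_steps <= 0:
--         return []
--     if len(template) == target_steps:
--         return list(template)
--     if len(template) > target_steps:
--         return list(template[:target_steps])
--
--     output = list(template)
--     while len(output) < target_steps:
--         if output:
--             output.append(-output[-1] if len(output) % 2 == 1 else output[-1])
--         else:
--             output.append(1)
--     return output[:target_steps]
-- ===== SOURCE B (Python) =====
-- def _adapt_step_template(template: list[int], target_steps: int) -> list[int]: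
--     if target_steps <= 0:
--         return []
--     base = list(template) if template else [1]
--     k = len(base) - 1
--     s = base[-1]
--     tail = [s * (-1) ** ((i + 1) // 2 - (k + 1) // 2)
--             for i in range(len(base), target_steps)]
--     return (base + tail)[:target_steps]
-- ===== Notes on version B (the rewrite author's own statement) =====
-- stated objective: alternative
-- what changed: Replaces the stateful while-loop (appending +/- the running last element) by a closed-form comprehension: each extension element is seed * (-1)**(parity count of odd indices), computed independently per index, and the three length branches collapse into one slice of base+tail.
import Mathlib
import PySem

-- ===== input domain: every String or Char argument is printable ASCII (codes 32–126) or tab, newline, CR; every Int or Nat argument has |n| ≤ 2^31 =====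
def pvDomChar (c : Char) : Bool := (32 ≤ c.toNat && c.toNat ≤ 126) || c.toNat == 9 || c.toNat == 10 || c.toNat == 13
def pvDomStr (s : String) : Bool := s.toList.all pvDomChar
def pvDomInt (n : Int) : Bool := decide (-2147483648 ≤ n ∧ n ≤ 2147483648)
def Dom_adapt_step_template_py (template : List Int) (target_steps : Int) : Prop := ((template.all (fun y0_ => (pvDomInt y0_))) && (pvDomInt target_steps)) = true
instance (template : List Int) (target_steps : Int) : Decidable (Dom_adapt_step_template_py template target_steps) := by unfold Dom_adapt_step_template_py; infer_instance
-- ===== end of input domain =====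

-- B replaces A's stateful append loop by a closed-form per-index sign formula (alternative decomposition, same cost).


-- ===== PORT A =====
-- the 'while len(output) < target_steps' loop, step for step
def adaptLoopA (output : List Int) (target : Nat) : List Int :=
  if output.length < target then
    let nxt : Int :=
      if output.isEmpty then 1
      else if output.length % 2 == 1 then -(output.getLast?.getD 0) else output.getLast?.getD 0
    adaptLoopA (output ++ [nxt]) target
  else output
termination_by target - output.length
decreasing_by simp; omega

def adapt_step_template_py (template : List Int) (target_steps : Int) : List Int :=
  if target_steps ≤ 0 then []
  else if (template.length : Int) = target_steps then template
  else if (template.length : Int) > target_steps then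
    template.take target_steps.toNat   -- template[:target_steps] with target_steps > 0: exact
  else (adaptLoopA template target_steps.toNat).take target_steps.toNat

-- ===== PORT B =====
def adapt_step_template_py_alt (template : List Int) (target_steps : Int) : List Int :=
  if target_steps ≤ 0 then []
  else
    let base := if template.isEmpty then [1] else template
    let k := base.length - 1
    let s := base.getLast?.getD 0   -- base[-1]; base is never empty
    -- range(len(base), target_steps) with target_steps > 0: exact as range' over Nat;
    -- Python's (-1) ** ((i+1)//2 - (k+1)//2) has a nonnegative exponent here (i ≥ k), so Nat '/'/'-' are exact
    let tail := (List.range' base.length (target_steps.toNat - base.length)).map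
        (fun i => s * (-1 : Int) ^ ((i + 1) / 2 - (k + 1) / 2))
    (base ++ tail).take target_steps.toNat   -- [:target_steps] with target_steps > 0: exact

-- ===== PRECONDITION & SPEC =====
def Spec_adapt_step_template_py (template : List Int) (target_steps : Int) (out : List Int) : Prop := out = adapt_step_template_py_alt template target_steps
instance (template : List Int) (target_steps : Int) (out : List Int) : Decidable (Spec_adapt_step_template_py template target_steps out) := by unfold Spec_adapt_step_template_py; infer_instance

-- ===== CLAIM (what is proved, stated in full; the proofs are below) =====
def Claim_equal_adapt_step_template_py : Prop := ∀ (template : List Int) (target_steps : Int), Dom_adapt_step_template_py template target_steps → Spec_adapt_step_template_py template target_steps (adapt_step_template_py template target_steps)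

-- ===== LEMMAS AND PROOFS =====

-- A's loop, started on a nonempty prefix of length L with last element s and run for n more
-- steps, produces exactly B's closed-form tail.
theorem adaptLoopA_spec (n : Nat) : ∀ (pre : List Int) (L : Nat) (s : Int),
    pre ≠ [] → pre.getLast? = some s → pre.length = L →
    adaptLoopA pre (L + n) =
      pre ++ (List.range' L n).map (fun i => s * (-1 : Int) ^ ((i + 1) / 2 - L / 2)) := by
  induction n with
  | zero =>
    intro pre L s _ _ hL
    rw [adaptLoopA]
    simp [hL]
  | succ m ih =>
    intro pre L s hne hlast hL
    rw [adaptLoopA]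
    have hlt : pre.length < L + (m + 1) := by omega
    have hempty : pre.isEmpty = false := by simpa [List.isEmpty_iff] using hne
    simp only [hlt, if_pos, hempty, Bool.false_eq_true, if_false, hlast, Option.getD_some]
    set nxt : Int := if pre.length % 2 == 1 then -s else s with hnxt
    have hpre' : (pre ++ [nxt]).getLast? = some nxt := by simp
    have hlen' : (pre ++ [nxt]).length = L + 1 := by simp [hL]
    have := ih (pre ++ [nxt]) (L + 1) nxt (by simp) hpre' hlen'
    rw [show L + (m + 1) = (L + 1) + m by omega, this, List.append_assoc]
    have hhead : s * (-1 : Int) ^ ((L + 1) / 2 - L / 2) = nxt := by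
      rw [hnxt, hL]
      rcases Nat.even_or_odd L with hE | hO
      · have h2 : L % 2 = 0 := Nat.even_iff.mp hE
        have hexp : (L + 1) / 2 - L / 2 = 0 := by omega
        simp [h2, hexp]
      · have h2 : L % 2 = 1 := Nat.odd_iff.mp hO
        have hexp : (L + 1) / 2 - L / 2 = 1 := by omega
        simp [h2, hexp]
    congr 1
    rw [List.range'_succ, List.map_cons]
    show nxt :: _ = _ :: _
    congr 1
    · exact hhead.symm
    · -- reseeding at index L preserves the closed form
      apply List.map_congr_left
      intro i hi
      have hiL : L + 1 ≤ i := (List.mem_range'_1.mp hi).1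
      have e1 : (i + 1) / 2 - L / 2 = ((L + 1) / 2 - L / 2) + ((i + 1) / 2 - (L + 1) / 2) := by
        omega
      rw [e1, pow_add, ← mul_assoc, hhead]

-- ===== VERDICT (by name: the statement is the Claim_ definition above) =====
theorem adapt_step_template_py_spec : Claim_equal_adapt_step_template_py := by
  intro template target_steps _
  unfold Spec_adapt_step_template_py adapt_step_template_py adapt_step_template_py_alt
  by_cases hneg : target_steps ≤ 0
  · simp [hneg]
  · simp only [hneg, if_false]
    have hpos : 0 < target_steps := by omega
    set t : Nat := target_steps.toNat with ht
    have htpos : 0 < t := by omega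
    have htcast : (t : Int) = target_steps := by omega
    by_cases heq : (template.length : Int) = target_steps
    · -- equal lengths: tail is empty, take is the identity
      have hL : template.length = t := by omega
      have hne : template.isEmpty = false := by
        cases template with
        | nil => simp at hL; omega
        | cons a l => rfl
      simp only [heq, if_pos, hne, Bool.false_eq_true, if_false]
      rw [hL]
      simp
      omega
    · simp only [heq, if_false]
      by_cases hgt : (template.length : Int) > target_steps
      · -- truncation: the extension tail is empty on both sides
        have hne : template.isEmpty = false := by
          cases template with
          | nil => simp at hgt; omega
          | cons a l => rfl
        have h0 : t - template.length = 0 := by omega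
        simp [hgt, hne, h0]
      · -- extension
        have hlt : template.length < t := by omega
        simp only [hgt, if_false]
        by_cases htempl : template.isEmpty
        · -- empty template: first loop iteration seeds a 1, then the closed form
          have hnil : template = [] := List.isEmpty_iff.mp htempl
          subst hnil
          have h1 : adaptLoopA [] t = adaptLoopA [1] t := by
            rw [adaptLoopA]
            simp [htpos]
          have h2 := adaptLoopA_spec (t - 1) [1] 1 1 (by simp) (by simp) (by simp)
          rw [show 1 + (t - 1) = t by omega] at h2
          have hlen : (([1] : List Int) ++
              (List.range' 1 (t - 1)).map (fun i => 1 * (-1 : Int) ^ ((i + 1) / 2 - 1 / 2))).length = t := by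
            simp; omega
          rw [h1, h2, List.take_of_length_le (le_of_eq hlen)]
          simp only [List.isEmpty_nil, if_pos]
          rw [List.take_of_length_le]
          · norm_num
          · simp; omega
        · -- nonempty template
          have hne : template ≠ [] := fun h => htempl (by simp [h])
          have hemp : template.isEmpty = false := by simpa [List.isEmpty_iff] using hne
          have hL1 : 1 ≤ template.length := List.length_pos_iff.mpr hne
          obtain ⟨s, hs⟩ : ∃ s, template.getLast? = some s :=
            Option.isSome_iff_exists.mp (List.getLast?_isSome.mpr hne)
          have h2 := adaptLoopA_spec (t - template.length) template template.length s hne hs rfl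
          rw [show template.length + (t - template.length) = t by omega] at h2
          have hk : (template.length - 1 + 1) = template.length := by omega
          have hlen : (template ++
              (List.range' template.length (t - template.length)).map
                (fun i => s * (-1 : Int) ^ ((i + 1) / 2 - template.length / 2))).length = t := by
            simp; omega
          rw [h2, List.take_of_length_le (le_of_eq hlen)]
          simp only [hemp, Bool.false_eq_true, if_false, hs, Option.getD_some, hk]
          rw [List.take_of_length_le (le_of_eq hlen)]
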